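-- pv_equiv track=rewrite | github.com/Nisha091999/Python | 2.py | LargeSmallSum
-- ===== SOURCE A (Python) =====
-- def LargeSmallSum(arr):
--     if len(arr) == 0 or len(arr) <= 3:
--         return 0
--
--     odd_elements = []
--     even_elements = []
--
--     # Separate the elements based on their indices
--     for i in range(len(arr)):
--         if i % 2 == 0:
--             even_elements.append(arr[i])
--         else:
--             odd_elements.append(arr[i])
--
--     # Ensure there are at least 2 elements in each list
--     if len(odd_elements) < 2 or len(even_elements) < 2:
--         return 0
--
--     # Find the second smallest in odd_elements and second largest in even_elements
--     odd_elements.sort()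
--     even_elements.sort(reverse=True)
--
--     second_smallest_odd = odd_elements[1]
--     second_largest_even = even_elements[1]
--
--     return second_smallest_odd + second_largest_even
-- ===== SOURCE B (Python) =====
-- def LargeSmallSum(arr):
--     if len(arr) <= 3:
--         return 0
--     lo1 = lo2 = None   # smallest / second-smallest odd-index element
--     hi1 = hi2 = None   # largest / second-largest even-index element
--     even_turn = True
--     for x in arr:
--         if even_turn:
--             if hi1 is None or x > hi1:
--                 hi2 = hi1
--                 hi1 = x
--             elif hi2 is None or x > hi2:
--                 hi2 = x
--         else:
--             if lo1 is None or x < lo1: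
--                 lo2 = lo1
--                 lo1 = x
--             elif lo2 is None or x < lo2:
--                 lo2 = x
--         even_turn = not even_turn
--     return lo2 + hi2
-- ===== Notes on version B (the rewrite author's own statement) =====
-- stated objective: faster
-- what changed: Replaces list-splitting plus two sorts with a single pass that maintains running (largest, second-largest) for even indices and (smallest, second-smallest) for odd indices via a parity toggle, never building or sorting sublists.
import Mathlib
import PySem

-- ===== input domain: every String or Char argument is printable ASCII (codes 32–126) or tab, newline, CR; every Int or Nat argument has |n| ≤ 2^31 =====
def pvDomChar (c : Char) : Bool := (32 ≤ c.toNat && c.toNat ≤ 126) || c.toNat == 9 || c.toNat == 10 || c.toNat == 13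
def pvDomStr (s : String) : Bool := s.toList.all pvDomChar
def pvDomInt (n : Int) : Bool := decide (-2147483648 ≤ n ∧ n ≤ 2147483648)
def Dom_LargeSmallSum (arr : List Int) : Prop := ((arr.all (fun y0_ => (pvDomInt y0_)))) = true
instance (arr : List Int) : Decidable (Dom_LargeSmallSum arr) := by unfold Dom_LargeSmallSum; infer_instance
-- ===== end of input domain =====

-- B replaces split-then-sort by a single pass keeping running (largest, second largest) of even
-- indices and (smallest, second smallest) of odd indices: O(n) instead of O(n log n). (objective: faster)

-- ===== PORT A =====
-- body of A's 'for i in range(len(arr))' loop, separating elements by index parity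
def pvStepA (arr : List Int) (st : List Int × List Int) (i : Int) : List Int × List Int :=
  match PySem.List.pyGet? arr i with
  | none => st  -- unreachable: i ranges over the valid indices of arr
  | some v => if PySem.Int.mod i 2 = 0 then (st.1 ++ [v], st.2) else (st.1, st.2 ++ [v])

def LargeSmallSum (arr : List Int) : Int :=
  if arr.length = 0 ∨ arr.length ≤ 3 then 0
  else
    let eo := (PySem.List.pyRange 0 (PySem.List.len arr) 1).foldl (pvStepA arr) ([], [])
    let even_elements := eo.1
    let odd_elements := eo.2
    if odd_elements.length < 2 ∨ even_elements.length < 2 then 0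
    else
      let oddS := PySem.List.sorted odd_elements (fun x => x) false
      let evenS := PySem.List.sorted even_elements (fun x => x) true
      match PySem.List.pyGet? oddS 1, PySem.List.pyGet? evenS 1 with
      | some a, some b => a + b
      | _, _ => 0  -- unreachable: both lists have length ≥ 2

-- ===== PORT B =====
-- 'if lo1 is None or x < lo1: lo2, lo1 = lo1, x; elif lo2 is None or x < lo2: lo2 = x'
def pvMinUpd (lo : Option Int × Option Int) (x : Int) : Option Int × Option Int :=
  match lo.1 with
  | none => (some x, lo.1)
  | some m =>
    if x < m then (some x, some m)
    else
      match lo.2 with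
      | none => (some m, some x)
      | some s => if x < s then (some m, some x) else (some m, some s)

-- 'if hi1 is None or x > hi1: hi2, hi1 = hi1, x; elif hi2 is None or x > hi2: hi2 = x'
def pvMaxUpd (hi : Option Int × Option Int) (x : Int) : Option Int × Option Int :=
  match hi.1 with
  | none => (some x, hi.1)
  | some m =>
    if x > m then (some x, some m)
    else
      match hi.2 with
      | none => (some m, some x)
      | some s => if x > s then (some m, some x) else (some m, some s)

-- one iteration of B's 'for x in arr' loop: state = (even_turn, (lo1, lo2), (hi1, hi2))
def pvStepB (st : Bool × (Option Int × Option Int) × (Option Int × Option Int)) (x : Int) :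
    Bool × (Option Int × Option Int) × (Option Int × Option Int) :=
  match st with
  | (evenTurn, lo, hi) =>
    if evenTurn then (false, lo, pvMaxUpd hi x) else (true, pvMinUpd lo x, hi)

def LargeSmallSum_alt (arr : List Int) : Int :=
  if arr.length ≤ 3 then 0
  else
    let st := arr.foldl pvStepB (true, (none, none), (none, none))
    match st.2.1.2 with
    | none => 0  -- unreachable: len(arr) ≥ 4 fills all four trackers
    | some lo2 =>
      match st.2.2.2 with
      | none => 0  -- unreachable likewise
      | some hi2 => lo2 + hi2

-- ===== PRECONDITION & SPEC =====
def Spec_LargeSmallSum (arr : List Int) (out : Int) : Prop := out = LargeSmallSum_alt arr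
instance (arr : List Int) (out : Int) : Decidable (Spec_LargeSmallSum arr out) := by unfold Spec_LargeSmallSum; infer_instance

-- ===== CLAIM (what is proved, stated in full; the proofs are below) =====
def Claim_equal_LargeSmallSum : Prop := ∀ (arr : List Int), Dom_LargeSmallSum arr → Spec_LargeSmallSum arr (LargeSmallSum arr)

-- ===== LEMMAS AND PROOFS =====

-- evens/odds of a list by index parity
def pvSplit : List Int → List Int × List Int
  | [] => ([], [])
  | x :: xs => (x :: (pvSplit xs).2, (pvSplit xs).1)

theorem pvSplit_length (l : List Int) :
    (pvSplit l).1.length = (l.length + 1) / 2 ∧ (pvSplit l).2.length = l.length / 2 := by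
  induction l with
  | nil => simp [pvSplit]
  | cons x xs ih => simp [pvSplit, ih.1, ih.2]; omega

theorem aLoop (post : List Int) : ∀ (pre e o : List Int),
    (PySem.List.pyRange pre.length ((pre.length : Int) + post.length) 1).foldl (pvStepA (pre ++ post)) (e, o)
    = if pre.length % 2 = 0 then (e ++ (pvSplit post).1, o ++ (pvSplit post).2)
      else (e ++ (pvSplit post).2, o ++ (pvSplit post).1) := by
  induction post with
  | nil =>
    intro pre e o
    rw [PySem.List.pyRange_one_eq_nil (by simp)]
    simp [pvSplit]
  | cons x xs ih =>
    intro pre e o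
    have hlt : (pre.length : Int) < (pre.length : Int) + (x :: xs).length := by
      simp
    rw [PySem.List.pyRange_one_cons hlt, List.foldl_cons]
    have hget : PySem.List.pyGet? (pre ++ x :: xs) pre.length = some x :=
      PySem.List.pyGet?_append_length pre xs x
    have hmod : PySem.Int.mod (pre.length : Int) 2 = (pre.length : Int) % 2 :=
      PySem.Int.mod_eq_emod_of_pos (by omega)
    have hstep : pvStepA (pre ++ x :: xs) (e, o) pre.length
        = if pre.length % 2 = 0 then (e ++ [x], o) else (e, o ++ [x]) := by
      simp only [pvStepA, hget, hmod]
      by_cases hp : pre.length % 2 = 0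
      · rw [if_pos (by omega), if_pos hp]
      · rw [if_neg (by omega), if_neg hp]
    have hre : ((pre ++ [x]).length : Int) = (pre.length : Int) + 1 := by simp
    have he : ((pre ++ [x]).length : Int) + xs.length = (pre.length : Int) + (x :: xs).length := by
      simp; omega
    have happ : (pre ++ [x]) ++ xs = pre ++ x :: xs := by simp
    have hthis := ih (pre ++ [x])
    rw [he, happ, hre] at hthis
    by_cases hp : pre.length % 2 = 0
    · have hc : ¬ (pre ++ [x]).length % 2 = 0 := by simp; omega
      have hs1 : pvStepA (pre ++ x :: xs) (e, o) pre.length = (e ++ [x], o) := by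
        rw [hstep, if_pos hp]
      rw [hs1, hthis (e ++ [x]) o, if_neg hc, if_pos hp]
      simp [pvSplit]
    · have hc : (pre ++ [x]).length % 2 = 0 := by simp; omega
      have hs1 : pvStepA (pre ++ x :: xs) (e, o) pre.length = (e, o ++ [x]) := by
        rw [hstep, if_neg hp]
      rw [hs1, hthis e (o ++ [x]), if_pos hc, if_neg hp]
      simp [pvSplit]


theorem bLoop (l : List Int) : ∀ (lo hi : Option Int × Option Int),
    ((l.foldl pvStepB (true, lo, hi)).2 = ((pvSplit l).2.foldl pvMinUpd lo, (pvSplit l).1.foldl pvMaxUpd hi)) ∧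
    ((l.foldl pvStepB (false, lo, hi)).2 = ((pvSplit l).1.foldl pvMinUpd lo, (pvSplit l).2.foldl pvMaxUpd hi)) := by
  induction l with
  | nil => intro lo hi; exact ⟨rfl, rfl⟩
  | cons x xs ih =>
    intro lo hi
    constructor
    · simp only [List.foldl_cons, pvStepB, if_pos]
      simpa [pvSplit] using (ih lo (pvMaxUpd hi x)).2
    · simp only [List.foldl_cons, pvStepB]
      simpa [pvSplit] using (ih (pvMinUpd lo x) hi).1

theorem pvMinUpd_rcomm (p : Option Int × Option Int) (x y : Int) :
    pvMinUpd (pvMinUpd p x) y = pvMinUpd (pvMinUpd p y) x := by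
  obtain ⟨l1, l2⟩ := p
  cases l1 <;> cases l2 <;> simp only [pvMinUpd] <;> split_ifs <;>
    first
      | rfl
      | omega
      | (simp_all; omega)
      | (simp; split_ifs <;> first | rfl | omega | (simp_all; omega))

theorem pvMaxUpd_rcomm (p : Option Int × Option Int) (x y : Int) :
    pvMaxUpd (pvMaxUpd p x) y = pvMaxUpd (pvMaxUpd p y) x := by
  obtain ⟨l1, l2⟩ := p
  cases l1 <;> cases l2 <;> simp only [pvMaxUpd] <;> split_ifs <;>
    first
      | rfl
      | omega
      | (simp_all; omega)
      | (simp; split_ifs <;> first | rfl | omega | (simp_all; omega))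

theorem minFold_tail (rest : List Int) : ∀ (a b : Int), a ≤ b → (∀ x ∈ rest, b ≤ x) →
    rest.foldl pvMinUpd (some a, some b) = (some a, some b) := by
  induction rest with
  | nil => intro a b _ _; rfl
  | cons r rs ih =>
    intro a b hab h
    have hr : b ≤ r := h r (by simp)
    have h1 : pvMinUpd (some a, some b) r = (some a, some b) := by
      simp only [pvMinUpd]; split_ifs <;> (try rfl) <;> omega
    simp only [List.foldl_cons, h1]
    exact ih a b hab (fun x hx => h x (by simp [hx]))

theorem maxFold_tail (rest : List Int) : ∀ (a b : Int), b ≤ a → (∀ x ∈ rest, x ≤ b) →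
    rest.foldl pvMaxUpd (some a, some b) = (some a, some b) := by
  induction rest with
  | nil => intro a b _ _; rfl
  | cons r rs ih =>
    intro a b hab h
    have hr : r ≤ b := h r (by simp)
    have h1 : pvMaxUpd (some a, some b) r = (some a, some b) := by
      simp only [pvMaxUpd]; split_ifs <;> (try rfl) <;> omega
    simp only [List.foldl_cons, h1]
    exact ih a b hab (fun x hx => h x (by simp [hx]))

theorem minFold_sorted (l : List Int) (s0 s1 : Int) (rest : List Int)
    (hs : PySem.List.sorted l (fun x => x) false = s0 :: s1 :: rest) :
    l.foldl pvMinUpd (none, none) = (some s0, some s1) := by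
  have hperm := PySem.List.sorted_perm l (fun x => x) false
  rw [hs] at hperm
  have hpw := PySem.List.sorted_pairwise l (fun x => x)
  rw [hs] at hpw
  have h01 : s0 ≤ s1 := (List.pairwise_cons.mp hpw).1 s1 (by simp)
  have hrest : ∀ x ∈ rest, s1 ≤ x :=
    (List.pairwise_cons.mp (List.pairwise_cons.mp hpw).2).1
  have hfold := @List.Perm.foldl_eq _ _ pvMinUpd _ _ ⟨pvMinUpd_rcomm⟩ hperm.symm (none, none)
  rw [hfold]
  have e1 : pvMinUpd (none, none) s0 = (some s0, none) := rfl
  have e2 : pvMinUpd (some s0, none) s1 = (some s0, some s1) := by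
    simp only [pvMinUpd]; split_ifs <;> (try rfl) <;> omega
  simp only [List.foldl_cons, e1, e2]
  exact minFold_tail rest s0 s1 h01 hrest

theorem maxFold_sorted (l : List Int) (s0 s1 : Int) (rest : List Int)
    (hs : PySem.List.sorted l (fun x => x) true = s0 :: s1 :: rest) :
    l.foldl pvMaxUpd (none, none) = (some s0, some s1) := by
  have hperm := PySem.List.sorted_perm l (fun x => x) true
  rw [hs] at hperm
  have hpw := PySem.List.sorted_pairwise_rev l (fun x => x)
  rw [hs] at hpw
  have h01 : s1 ≤ s0 := (List.pairwise_cons.mp hpw).1 s1 (by simp)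
  have hrest : ∀ x ∈ rest, x ≤ s1 :=
    (List.pairwise_cons.mp (List.pairwise_cons.mp hpw).2).1
  have hfold := @List.Perm.foldl_eq _ _ pvMaxUpd _ _ ⟨pvMaxUpd_rcomm⟩ hperm.symm (none, none)
  rw [hfold]
  have e1 : pvMaxUpd (none, none) s0 = (some s0, none) := rfl
  have e2 : pvMaxUpd (some s0, none) s1 = (some s0, some s1) := by
    simp only [pvMaxUpd]; split_ifs <;> (try rfl) <;> omega
  simp only [List.foldl_cons, e1, e2]
  exact maxFold_tail rest s0 s1 h01 hrest

-- ===== VERDICT (by name: the statement is the Claim_ definition above) =====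
theorem LargeSmallSum_spec : Claim_equal_LargeSmallSum := by
  intro arr _
  unfold Spec_LargeSmallSum
  by_cases h3 : arr.length ≤ 3
  · simp [LargeSmallSum, LargeSmallSum_alt, h3]
  · have h4 : 4 ≤ arr.length := by omega
    -- A's index loop produces the even/odd split
    have hA : (PySem.List.pyRange 0 (PySem.List.len arr) 1).foldl (pvStepA arr) ([], [])
        = ((pvSplit arr).1, (pvSplit arr).2) := by
      have := aLoop arr [] [] []
      simpa using this
    -- lengths of the split
    have hlen := pvSplit_length arr
    have he2 : 2 ≤ (pvSplit arr).1.length := by omega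
    have ho2 : 2 ≤ (pvSplit arr).2.length := by omega
    -- the two sorted lists have at least two elements
    have hslen : (PySem.List.sorted (pvSplit arr).2 (fun x => x) false).length = (pvSplit arr).2.length :=
      PySem.List.length_sorted _ _ _
    have htlen : (PySem.List.sorted (pvSplit arr).1 (fun x => x) true).length = (pvSplit arr).1.length :=
      PySem.List.length_sorted _ _ _
    obtain ⟨s0, s1, srest, hs⟩ : ∃ s0 s1 srest,
        PySem.List.sorted (pvSplit arr).2 (fun x => x) false = s0 :: s1 :: srest := by
      rcases hl : PySem.List.sorted (pvSplit arr).2 (fun x => x) false with _ | ⟨a, _ | ⟨b, r⟩⟩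
      · rw [hl] at hslen; simp at hslen; omega
      · rw [hl] at hslen; simp at hslen; omega
      · exact ⟨a, b, r, rfl⟩
    obtain ⟨t0, t1, trest, ht⟩ : ∃ t0 t1 trest,
        PySem.List.sorted (pvSplit arr).1 (fun x => x) true = t0 :: t1 :: trest := by
      rcases hl : PySem.List.sorted (pvSplit arr).1 (fun x => x) true with _ | ⟨a, _ | ⟨b, r⟩⟩
      · rw [hl] at htlen; simp at htlen; omega
      · rw [hl] at htlen; simp at htlen; omega
      · exact ⟨a, b, r, rfl⟩
    -- value of A
    have hA2 : LargeSmallSum arr = s1 + t1 := by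
      rw [LargeSmallSum, if_neg (by omega)]
      simp only [hA]
      rw [if_neg (by omega)]
      simp only [hs, ht]
      have g1 : PySem.List.pyGet? (s0 :: s1 :: srest) 1 = some s1 := by
        simp [PySem.List.pyGet?, PySem.List.pyIdx?]
      have g2 : PySem.List.pyGet? (t0 :: t1 :: trest) 1 = some t1 := by
        simp [PySem.List.pyGet?, PySem.List.pyIdx?]
      rw [g1, g2]
    -- value of B
    have hB2 : LargeSmallSum_alt arr = s1 + t1 := by
      rw [LargeSmallSum_alt, if_neg h3]
      have hb := (bLoop arr (none, none) (none, none)).1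
      have hmin := minFold_sorted (pvSplit arr).2 s0 s1 srest hs
      have hmax := maxFold_sorted (pvSplit arr).1 t0 t1 trest ht
      rw [hmin, hmax] at hb
      simp only [hb]
    rw [hA2, hB2]
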